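-- pv_equiv track=rewrite | github.com/Xuan-1998/CORAL | experiments/multiagent_analysis/cross_task_analysis.py | best_at_k
-- ===== SOURCE A (Python) =====
-- def is_better(a, b, direction):
--     if direction == "maximize":
--         return a > b
--     return a < b
--
-- def best_at_k(attempts, direction):
--     best = None
--     curve = []
--     for a in attempts:
--         s = a["score"]
--         if best is None or is_better(s, best, direction):
--             best = s
--         curve.append(best)
--     return curve
-- ===== SOURCE B (Python) =====
-- def best_at_k(attempts, direction):
--     op = max if direction == "maximize" else min
--     scores = [a["score"] for a in attempts]
--     return [op(scores[:k + 1]) for k in range(len(scores))]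
-- ===== Notes on version B (the rewrite author's own statement) =====
-- stated objective: alternative
-- what changed: B keeps no running-best state at all: for each position k it recomputes the best directly as max/min of the prefix scores[:k+1], a stateless per-prefix reduction instead of A's None-seeded accumulator loop (O(n^2) vs O(n)).
-- outside the precondition, e.g. on best_at_k([{}], 'maximize'): A raises KeyError, B raises KeyError
import Mathlib
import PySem

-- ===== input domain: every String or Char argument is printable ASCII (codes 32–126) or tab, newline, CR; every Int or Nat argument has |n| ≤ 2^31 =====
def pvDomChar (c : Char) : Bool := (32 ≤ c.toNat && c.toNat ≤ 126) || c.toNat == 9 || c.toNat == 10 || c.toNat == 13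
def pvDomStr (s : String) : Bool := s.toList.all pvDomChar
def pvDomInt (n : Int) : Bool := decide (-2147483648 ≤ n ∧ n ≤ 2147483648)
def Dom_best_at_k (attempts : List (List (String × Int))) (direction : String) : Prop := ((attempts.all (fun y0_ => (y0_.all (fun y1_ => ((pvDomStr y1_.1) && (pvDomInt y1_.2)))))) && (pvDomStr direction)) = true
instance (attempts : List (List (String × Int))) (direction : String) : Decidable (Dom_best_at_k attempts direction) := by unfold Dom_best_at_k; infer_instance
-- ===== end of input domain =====

-- B keeps no running-best state: for each position k it recomputes the best as
-- max/min over the prefix scores[:k+1] (stateless per-prefix reduction, O(n^2)),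
-- instead of A's None-seeded accumulator loop; chosen as a genuinely different algorithm.

-- ===== PORT A =====
def is_better (a b : Int) (direction : String) : Bool :=
  if direction == "maximize" then a > b else a < b

def best_at_k (attempts : List (List (String × Int))) (direction : String) : List Int :=
  (attempts.foldl (fun (st : Option Int × List Int) a =>
      let s := (a.lookup "score").getD 0   -- Pre_ guarantees the key is present
      let best := match st.1 with
        | none => s
        | some b => if is_better s b direction then s else b
      (some best, st.2 ++ [best]))
    (none, [])).2

-- ===== PORT B =====
-- Python's max/min over a nonempty int list: fold over the tail from the head
-- (the empty case is unreachable since take (k+1) of scores with k < scores.length is nonempty).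
def best_at_k_alt (attempts : List (List (String × Int))) (direction : String) : List Int :=
  let op := fun (acc s : Int) => if direction == "maximize" then max acc s else min acc s
  let scores := attempts.map (fun a => (a.lookup "score").getD 0)
  (List.range scores.length).map (fun k =>
    match scores.take (k + 1) with
    | [] => 0
    | y :: ys => ys.foldl op y)

-- ===== PRECONDITION & SPEC =====
-- Pre_ excludes exactly the inputs where some attempt lacks the "score" key, on which A raises KeyError.
def Pre_best_at_k (attempts : List (List (String × Int))) (direction : String) : Prop :=
  ∀ a ∈ attempts, (a.lookup "score").isSome = true
instance (attempts : List (List (String × Int))) (direction : String) : Decidable (Pre_best_at_k attempts direction) := by unfold Pre_best_at_k; infer_instance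
def pvWitness_best_at_k : (List (List (String × Int))) × String := ([[("score", 3)], [("score", 1)]], "maximize")

def Spec_best_at_k (attempts : List (List (String × Int))) (direction : String) (out : List Int) : Prop := out = best_at_k_alt attempts direction
instance (attempts : List (List (String × Int))) (direction : String) (out : List Int) : Decidable (Spec_best_at_k attempts direction out) := by unfold Spec_best_at_k; infer_instance

-- ===== CLAIM =====
def Claim_equal_best_at_k : Prop := ∀ (attempts : List (List (String × Int))) (direction : String), Dom_best_at_k attempts direction → Pre_best_at_k attempts direction → Spec_best_at_k attempts direction (best_at_k attempts direction)

-- ===== LEMMAS AND PROOFS =====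

-- A's update and B's max/min step agree pointwise.
lemma step_eq (direction : String) (b s : Int) :
    (if is_better s b direction then s else b)
      = (if direction == "maximize" then max b s else min b s) := by
  unfold is_better
  by_cases h : direction == "maximize" <;> simp [h] <;> split_ifs <;> omega

lemma scanl_head_tail (f : Int → Int → Int) (b : Int) (l : List Int) :
    List.scanl f b l = b :: (List.scanl f b l).tail := by
  cases l <;> simp [List.scanl]

-- A's fold after the best is seeded, as a function of the remaining scores.
lemma foldl_some (f : Int → Int → Int) (scores : List Int) :
    ∀ (b : Int) (cs : List Int),
    (scores.foldl (fun (st : Option Int × List Int) s =>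
        let best := match st.1 with
          | none => s
          | some b => f b s
        (some best, st.2 ++ [best])) (some b, cs)).2
      = cs ++ (List.scanl f b scores).tail := by
  induction scores with
  | nil => intro b cs; simp
  | cons s rest ih =>
    intro b cs
    simp only [List.foldl_cons]
    rw [ih, List.scanl_cons, List.tail_cons]
    conv_rhs => rw [scanl_head_tail f (f b s) rest]
    simp

-- A's fold over the projected score list equals scanl of the step function.
lemma a_eq_scanl (direction : String) (scores : List Int) :
    (scores.foldl (fun (st : Option Int × List Int) s =>
        let best := match st.1 with
          | none => s
          | some b => if is_better s b direction then s else b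
        (some best, st.2 ++ [best])) (none, [])).2
      = (match scores with
         | [] => []
         | x :: xs => List.scanl (fun acc s => if direction == "maximize" then max acc s else min acc s) x xs) := by
  cases scores with
  | nil => simp
  | cons x xs =>
    simp only [List.foldl_cons]
    have hstep : (fun (st : Option Int × List Int) s =>
        let best := match st.1 with
          | none => s
          | some b => if is_better s b direction then s else b
        (some best, st.2 ++ [best]))
      = (fun (st : Option Int × List Int) s =>
        let best := match st.1 with
          | none => s
          | some b => (fun b s => if direction == "maximize" then max b s else min b s) b s
        (some best, st.2 ++ [best])) := by
      funext st s
      cases st.1 with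
      | none => rfl
      | some b => simp [step_eq direction b s]
    rw [hstep]
    have := foldl_some (fun b s => if direction == "maximize" then max b s else min b s) xs x ([] ++ [x])
    simp only at this ⊢
    rw [this]
    exact (scanl_head_tail _ x xs).symm

-- scanl of a step function equals the per-prefix fold B computes at every index.
lemma scanl_eq_prefix (f : Int → Int → Int) :
    ∀ (xs : List Int) (x : Int),
    List.scanl f x xs
      = (List.range (x :: xs).length).map (fun k =>
          match (x :: xs).take (k + 1) with
          | [] => 0
          | y :: ys => ys.foldl f y) := by
  intro xs
  induction xs with
  | nil => intro x; simp [List.scanl]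
  | cons s rest ih =>
    intro x
    rw [List.scanl_cons]
    have hlen : (x :: s :: rest).length = (s :: rest).length + 1 := rfl
    rw [hlen, List.range_succ_eq_map, List.map_cons, List.map_map]
    congr 1
    rw [ih (f x s)]
    apply List.map_congr_left
    intro k hk
    simp only [Function.comp]
    have h1 : (x :: s :: rest).take (k + 1 + 1) = x :: (s :: rest).take (k + 1) := rfl
    have h2 : (s :: rest).take (k + 1) = s :: rest.take k := rfl
    have h3 : ((f x s) :: rest).take (k + 1) = (f x s) :: rest.take k := rfl
    rw [h1, h2, h3]
    simp [List.foldl_cons]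

-- The core equality: A's fold = B's per-prefix map, over the projected score list.
lemma core (direction : String) (scores : List Int) :
    (scores.foldl (fun (st : Option Int × List Int) s =>
        let best := match st.1 with
          | none => s
          | some b => if is_better s b direction then s else b
        (some best, st.2 ++ [best])) (none, [])).2
      = (List.range scores.length).map (fun k =>
          match scores.take (k + 1) with
          | [] => 0
          | y :: ys => ys.foldl (fun acc s => if direction == "maximize" then max acc s else min acc s) y) := by
  rw [a_eq_scanl]
  cases scores with
  | nil => simp
  | cons x xs => exact scanl_eq_prefix _ xs x

-- ===== VERDICT =====
theorem best_at_k_spec : Claim_equal_best_at_k := by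
  intro attempts direction _ _
  unfold Spec_best_at_k best_at_k best_at_k_alt
  have h := core direction (attempts.map (fun a => (a.lookup "score").getD 0))
  rw [List.foldl_map] at h
  exact h
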